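-- pv_equiv track=rewrite | github.com/kbruhadesh/Automated-Global-Tour-Planner- | backend/services/intelligence.py | parse_season_months
-- ===== SOURCE A (Python) =====
-- from typing import Dict, List, Optional, Tuple, Set
--
-- MONTH_NAMES = {
--     "january": 1, "february": 2, "march": 3, "april": 4,
--     "may": 5, "june": 6, "july": 7, "august": 8,
--     "september": 9, "october": 10, "november": 11, "december": 12,
-- }
--
-- def parse_season_months(season_str: str) -> List[int]:
--     """
--     Parse a season string like 'March - May, September - November'
--     into a list of month numbers [3, 4, 5, 9, 10, 11].
--     """
--     if not season_str:
--         return list(range(1, 13))  # All months if no data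
--
--     months = []
--     # Split by comma for multiple ranges
--     ranges = [r.strip() for r in season_str.split(",")]
--
--     for rng in ranges:
--         parts = [p.strip().lower() for p in rng.split("-")]
--         if len(parts) == 2:
--             start_month = MONTH_NAMES.get(parts[0])
--             end_month = MONTH_NAMES.get(parts[1])
--             if start_month and end_month:
--                 if start_month <= end_month:
--                     months.extend(range(start_month, end_month + 1))
--                 else:
--                     # Wrap around (e.g., November - March)
--                     months.extend(range(start_month, 13))
--                     months.extend(range(1, end_month + 1))
--         elif len(parts) == 1:
--             m = MONTH_NAMES.get(parts[0])
--             if m: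
--                 months.append(m)
--
--     return sorted(set(months)) if months else list(range(1, 13))
-- ===== SOURCE B (Python) =====
-- MONTH_NAMES = {
--     "january": 1, "february": 2, "march": 3, "april": 4,
--     "may": 5, "june": 6, "july": 7, "august": 8,
--     "september": 9, "october": 10, "november": 11, "december": 12,
-- }
--
-- def _term_interval(term):
--     """Resolve one comma-separated term to a circular month interval, or None."""
--     parts = [p.strip().lower() for p in term.split("-")]
--     if len(parts) == 2:
--         s = MONTH_NAMES.get(parts[0])
--         e = MONTH_NAMES.get(parts[1])
--         if s and e:
--             return (s, e)
--     elif len(parts) == 1: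
--         m = MONTH_NAMES.get(parts[0])
--         if m:
--             return (m, m)
--     return None
--
-- def _covers(m, iv):
--     s, e = iv
--     if s <= e:
--         return s <= m <= e
--     return m >= s or m <= e  # wrap-around interval
--
-- def parse_season_months(season_str: str) -> list:
--     if not season_str:
--         return list(range(1, 13))
--     intervals = []
--     for term in season_str.split(","):
--         iv = _term_interval(term.strip())
--         if iv is not None:
--             intervals.append(iv)
--     if not intervals:
--         return list(range(1, 13))
--     # month-driven scan: output is sorted and duplicate-free by construction
--     return [m for m in range(1, 13) if any(_covers(m, iv) for iv in intervals)]
-- ===== Notes on version B (the rewrite author's own statement) =====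
-- stated objective: alternative
-- what changed: B never expands ranges into month lists: it parses each term into a circular interval (start,end) once, then emits the answer by testing each month 1..12 for coverage by some interval, so there is no range expansion, no set and no sort.
import Mathlib
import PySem

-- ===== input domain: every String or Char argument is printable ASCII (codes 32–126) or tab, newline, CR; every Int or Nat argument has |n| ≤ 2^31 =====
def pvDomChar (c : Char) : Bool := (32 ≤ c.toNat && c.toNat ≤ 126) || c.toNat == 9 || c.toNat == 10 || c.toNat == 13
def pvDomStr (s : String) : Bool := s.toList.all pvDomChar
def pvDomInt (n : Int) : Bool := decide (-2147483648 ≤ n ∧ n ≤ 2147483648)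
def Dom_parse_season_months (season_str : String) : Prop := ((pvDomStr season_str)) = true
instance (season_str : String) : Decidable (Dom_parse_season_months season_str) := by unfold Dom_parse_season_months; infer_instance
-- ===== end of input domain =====

-- B parses each term into a circular interval once and then emits the answer by a month-driven
-- coverage scan over 1..12 — no range expansion, no set, no sort (objective: alternative).

-- ===== PORT A =====
-- s.split(sep) with the nonempty literal separators "," / "-": split? is always `some` there, so getD is exact
def pySplit (s sep : String) : List String := (PySem.Str.split? s sep).getD []

def MONTH_NAMES : PySem.Dict String Int := PySem.Dict.ofList
  [("january", 1), ("february", 2), ("march", 3), ("april", 4),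
   ("may", 5), ("june", 6), ("july", 7), ("august", 8),
   ("september", 9), ("october", 10), ("november", 11), ("december", 12)]

def stepA (months : List Int) (rng : String) : List Int :=
  let parts := (pySplit rng "-").map (fun p => PySem.Str.lower (PySem.Str.strip p))
  match parts with
  | [p0, p1] =>
    match MONTH_NAMES.get? p0, MONTH_NAMES.get? p1 with
    | some s, some e =>
      if s ≠ 0 ∧ e ≠ 0 then
        if s ≤ e then months ++ PySem.List.pyRange s (e + 1) 1
        else (months ++ PySem.List.pyRange s 13 1) ++ PySem.List.pyRange 1 (e + 1) 1
      else months
    | _, _ => months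
  | [p0] =>
    match MONTH_NAMES.get? p0 with
    | some m => if m ≠ 0 then months ++ [m] else months
    | none => months
  | _ => months

def parse_season_months (season_str : String) : List Int :=
  if season_str = "" then PySem.List.pyRange 1 13 1
  else
    let ranges := (pySplit season_str ",").map (fun r => PySem.Str.strip r)
    let months := ranges.foldl stepA []
    if months ≠ [] then PySem.List.sorted (PySem.Set.ofList months) (fun x => x) false
    else PySem.List.pyRange 1 13 1

-- ===== PORT B =====
def term_interval (term : String) : Option (Int × Int) :=
  let parts := (pySplit term "-").map (fun p => PySem.Str.lower (PySem.Str.strip p))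
  match parts with
  | [p0, p1] =>
    match MONTH_NAMES.get? p0, MONTH_NAMES.get? p1 with
    | some s, some e => if s ≠ 0 ∧ e ≠ 0 then some (s, e) else none
    | _, _ => none
  | [p0] =>
    match MONTH_NAMES.get? p0 with
    | some m => if m ≠ 0 then some (m, m) else none
    | none => none
  | _ => none

def covers (m : Int) (iv : Int × Int) : Bool :=
  if iv.1 ≤ iv.2 then decide (iv.1 ≤ m ∧ m ≤ iv.2)
  else decide (iv.1 ≤ m ∨ m ≤ iv.2)  -- wrap-around interval

def stepI (acc : List (Int × Int)) (t : String) : List (Int × Int) :=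
  match term_interval (PySem.Str.strip t) with
  | some iv => acc ++ [iv]
  | none => acc

def parse_season_months_alt (season_str : String) : List Int :=
  if season_str = "" then PySem.List.pyRange 1 13 1
  else
    let intervals := (pySplit season_str ",").foldl stepI []
    if intervals = [] then PySem.List.pyRange 1 13 1
    else (PySem.List.pyRange 1 13 1).filter (fun m => intervals.any (fun iv => covers m iv))

-- ===== PRECONDITION & SPEC =====
def Spec_parse_season_months (season_str : String) (out : List Int) : Prop := out = parse_season_months_alt season_str
instance (season_str : String) (out : List Int) : Decidable (Spec_parse_season_months season_str out) := by unfold Spec_parse_season_months; infer_instance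

-- ===== CLAIM (what is proved, stated in full; the proofs are below) =====
def Claim_equal_parse_season_months : Prop := ∀ (season_str : String), Dom_parse_season_months season_str → Spec_parse_season_months season_str (parse_season_months season_str)

-- ===== LEMMAS AND PROOFS =====

set_option maxHeartbeats 1000000 in
theorem mn_values : MONTH_NAMES.items.map (·.2) = [(1:Int),2,3,4,5,6,7,8,9,10,11,12] := by decide

theorem month_names_bound (p : String) (m : Int) (h : MONTH_NAMES.get? p = some m) :
    1 ≤ m ∧ m ≤ 12 := by
  simp only [PySem.Dict.get?] at h
  obtain ⟨pr, hfind, hsnd⟩ := Option.map_eq_some_iff.mp h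
  have hm : m ∈ MONTH_NAMES.items.map (·.2) :=
    hsnd ▸ List.mem_map_of_mem (List.mem_of_find?_eq_some hfind)
  rw [mn_values] at hm
  simp at hm
  omega

-- the month list A appends for a resolved range equals coverage by the interval, on 1..12
theorem chunk_mem (s e x : Int) (hx1 : 1 ≤ x) (hx2 : x ≤ 12) :
    (x ∈ (if s ≤ e then PySem.List.pyRange s (e + 1) 1
          else PySem.List.pyRange s 13 1 ++ PySem.List.pyRange 1 (e + 1) 1)) ↔
      covers x (s, e) = true := by
  unfold covers
  by_cases hse : s ≤ e <;>
    simp only [hse, ite_true, ite_false, List.mem_append, PySem.List.mem_pyRange_one,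
      decide_eq_true_eq] <;> omega

theorem step_inv (months : List Int) (ivs : List (Int × Int)) (t : String)
    (hmem : ∀ x, 1 ≤ x ∧ x ≤ 12 → (x ∈ months ↔ ∃ iv ∈ ivs, covers x iv = true))
    (hbd : ∀ x ∈ months, 1 ≤ x ∧ x ≤ 12)
    (hne : months = [] ↔ ivs = []) :
    (∀ x, 1 ≤ x ∧ x ≤ 12 →
        (x ∈ stepA months (PySem.Str.strip t) ↔ ∃ iv ∈ stepI ivs t, covers x iv = true)) ∧
      (∀ x ∈ stepA months (PySem.Str.strip t), 1 ≤ x ∧ x ≤ 12) ∧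
      (stepA months (PySem.Str.strip t) = [] ↔ stepI ivs t = []) := by
  unfold stepA stepI term_interval
  rcases hp : (pySplit (PySem.Str.strip t) "-").map (fun p => PySem.Str.lower (PySem.Str.strip p)) with
    _ | ⟨p0, _ | ⟨p1, _ | _⟩⟩ <;> dsimp only
  · exact ⟨hmem, hbd, hne⟩
  · rcases hg : MONTH_NAMES.get? p0 with _ | m
    · exact ⟨hmem, hbd, hne⟩
    · obtain ⟨hm1, hm2⟩ := month_names_bound p0 m hg
      have hm0 : m ≠ 0 := by omega
      dsimp only
      rw [if_pos hm0, if_pos hm0]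
      dsimp only
      refine ⟨?_, ?_, by simp⟩
      · intro x hx
        rw [List.mem_append, hmem x hx]
        constructor
        · rintro (⟨iv, h1, h2⟩ | h)
          · exact ⟨iv, List.mem_append_left _ h1, h2⟩
          · simp only [List.mem_singleton] at h
            exact ⟨(m, m), List.mem_append_right _ (by simp), by simp [covers]; omega⟩
        · rintro ⟨iv, h1, h2⟩
          rcases List.mem_append.mp h1 with h1 | h1
          · exact Or.inl ⟨iv, h1, h2⟩
          · simp only [List.mem_singleton] at h1
            subst h1
            simp only [covers, le_refl, ite_true, decide_eq_true_eq] at h2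
            exact Or.inr (by simp; omega)
      · intro x hx
        rcases List.mem_append.mp hx with h | h
        · exact hbd x h
        · simp at h; omega
  · rcases hg0 : MONTH_NAMES.get? p0 with _ | s
    · exact ⟨hmem, hbd, hne⟩
    · rcases hg1 : MONTH_NAMES.get? p1 with _ | e
      · exact ⟨hmem, hbd, hne⟩
      · obtain ⟨hs1, hs2⟩ := month_names_bound p0 s hg0
        obtain ⟨he1, he2⟩ := month_names_bound p1 e hg1
        have hg' : s ≠ 0 ∧ e ≠ 0 := by omega
        dsimp only
        rw [if_pos hg', if_pos hg']
        dsimp only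
        have hchunkform : (if s ≤ e then months ++ PySem.List.pyRange s (e + 1) 1
              else (months ++ PySem.List.pyRange s 13 1) ++ PySem.List.pyRange 1 (e + 1) 1) =
            months ++ (if s ≤ e then PySem.List.pyRange s (e + 1) 1
              else PySem.List.pyRange s 13 1 ++ PySem.List.pyRange 1 (e + 1) 1) := by
          by_cases hse : s ≤ e <;> simp [hse, List.append_assoc]
        rw [hchunkform]
        have hsmem : s ∈ (if s ≤ e then PySem.List.pyRange s (e + 1) 1
            else PySem.List.pyRange s 13 1 ++ PySem.List.pyRange 1 (e + 1) 1) := by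
          by_cases hse : s ≤ e <;>
            simp only [hse, ite_true, ite_false, List.mem_append, PySem.List.mem_pyRange_one] <;>
            omega
        refine ⟨?_, ?_, ?_⟩
        · intro x hx
          rw [List.mem_append, hmem x hx, chunk_mem s e x hx.1 hx.2]
          constructor
          · rintro (⟨iv, h1, h2⟩ | h)
            · exact ⟨iv, List.mem_append_left _ h1, h2⟩
            · exact ⟨(s, e), List.mem_append_right _ (by simp), h⟩
          · rintro ⟨iv, h1, h2⟩
            rcases List.mem_append.mp h1 with h1 | h1
            · exact Or.inl ⟨iv, h1, h2⟩
            · simp only [List.mem_singleton] at h1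
              subst h1
              exact Or.inr h2
        · intro x hx
          rcases List.mem_append.mp hx with h | h
          · exact hbd x h
          · by_cases hse : s ≤ e <;>
              simp only [hse, ite_true, ite_false, List.mem_append,
                PySem.List.mem_pyRange_one] at h <;> omega
        · simp [List.ne_nil_of_mem hsmem]
  · exact ⟨hmem, hbd, hne⟩

theorem fold_inv (ts : List String) (months : List Int) (ivs : List (Int × Int))
    (hmem : ∀ x, 1 ≤ x ∧ x ≤ 12 → (x ∈ months ↔ ∃ iv ∈ ivs, covers x iv = true))
    (hbd : ∀ x ∈ months, 1 ≤ x ∧ x ≤ 12)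
    (hne : months = [] ↔ ivs = []) :
    (∀ x, 1 ≤ x ∧ x ≤ 12 →
        ((x ∈ (ts.map (fun r => PySem.Str.strip r)).foldl stepA months) ↔
          ∃ iv ∈ ts.foldl stepI ivs, covers x iv = true)) ∧
      (∀ x ∈ (ts.map (fun r => PySem.Str.strip r)).foldl stepA months, 1 ≤ x ∧ x ≤ 12) ∧
      ((ts.map (fun r => PySem.Str.strip r)).foldl stepA months = [] ↔ ts.foldl stepI ivs = []) := by
  induction ts generalizing months ivs with
  | nil => exact ⟨hmem, hbd, hne⟩
  | cons t ts ih =>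
    obtain ⟨h1, h2, h3⟩ := step_inv months ivs t hmem hbd hne
    simp only [List.map_cons, List.foldl_cons]
    exact ih _ _ h1 h2 h3

theorem sorted_set_eq_filter (months : List Int) (ivs : List (Int × Int))
    (hmem : ∀ x, 1 ≤ x ∧ x ≤ 12 → (x ∈ months ↔ ∃ iv ∈ ivs, covers x iv = true))
    (hbd : ∀ x ∈ months, 1 ≤ x ∧ x ≤ 12) :
    PySem.List.sorted (PySem.Set.ofList months) (fun x => x) false =
      (PySem.List.pyRange 1 13 1).filter (fun m => ivs.any (fun iv => covers m iv)) := by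
  apply PySem.List.sorted_eq_of_perm_of_pairwise_lt
  · rw [List.perm_ext_iff_of_nodup
      ((PySem.List.nodup_pyRange_one 1 13).filter _) (PySem.Set.nodup_ofList _)]
    intro a
    simp only [List.mem_filter, PySem.List.mem_pyRange_one, PySem.Set.mem_ofList,
      List.any_eq_true]
    constructor
    · rintro ⟨⟨ha1, ha2⟩, h⟩
      exact (hmem a ⟨ha1, by omega⟩).mpr h
    · intro h
      obtain ⟨ha1, ha2⟩ := hbd a h
      exact ⟨⟨ha1, by omega⟩, (hmem a ⟨ha1, ha2⟩).mp h⟩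
  · exact (PySem.List.pairwise_lt_pyRange_one 1 13).filter _

-- ===== VERDICT (by name: the statement is the Claim_ definition above) =====
theorem parse_season_months_spec : Claim_equal_parse_season_months := by
  intro season_str _
  unfold Spec_parse_season_months parse_season_months parse_season_months_alt
  by_cases h0 : season_str = ""
  · simp [h0]
  · rw [if_neg h0, if_neg h0]
    simp only []
    obtain ⟨hmem, hbd, hne⟩ := fold_inv (pySplit season_str ",") [] []
      (by intro x _; simp) (by intro x hx; cases hx) (by simp)
    by_cases hm : ((pySplit season_str ",").map (fun r => PySem.Str.strip r)).foldl stepA [] = []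
    · rw [hm, if_neg (by simp), if_pos (hne.mp hm)]
    · rw [if_pos hm, if_neg (fun h => hm (hne.mpr h))]
      exact sorted_set_eq_filter _ _ hmem hbd
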